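-- pv_equiv track=rewrite | github.com/blbadger/inferiodic | inferiodic/periodicity.py | periodicity
-- ===== SOURCE A (Python) =====
-- def periodicity(tokens):
--  	periodicity = 0
--  	first_periodic_token = 0
--  	for i, token in enumerate(tokens):
--  		if token in tokens[i+1:]:
--  			next_occurrences = [j for j, x in enumerate(tokens) if x == token and j>i]
--  			for next_occurrence in next_occurrences:
-- 	 			start_index, end_index = i, next_occurrence
-- 	 			token_sequence = tokens[i:next_occurrence]
-- 	 			while end_index <= len(tokens):
-- 	 				gap = end_index - start_index
-- 		 			if end_index >= len(tokens):
-- 		 				if tokens[start_index:] == token_sequence[:len(tokens[start_index:])]: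
-- 				 			first_periodic_token = i
-- 				 			periodicity = gap
-- 				 			return first_periodic_token, periodicity
--
-- 			 		if tokens[start_index:end_index] != token_sequence:
-- 	 					break
--
-- 			 		end_index += gap
-- 			 		start_index += gap
--
--  	return first_periodic_token, periodicity
-- ===== SOURCE B (Python) =====
-- def periodicity(tokens):
--     # For each start index i (earliest first), find the smallest period p such
--     # that the suffix tokens[i:] is an exact whole number of repetitions of
--     # tokens[i:i+p]: p must divide the suffix length and shifting the suffix
--     # by p must leave it unchanged (tokens[i:n-p] == tokens[i+p:]).
--     n = len(tokens)
--     for i in range(n):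
--         m = n - i
--         for p in range(1, m):
--             if m % p == 0 and tokens[i:n - p] == tokens[i + p:]:
--                 return i, p
--     return 0, 0
-- ===== Notes on version B (the rewrite author's own statement) =====
-- stated objective: simpler
-- what changed: Replaces A's occurrence-list construction and blockwise repetition-checking while-loop with a plain double loop over start index and candidate period, testing each divisor period with a single shift comparison tokens[i:n-p] == tokens[i+p:].
import Mathlib
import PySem

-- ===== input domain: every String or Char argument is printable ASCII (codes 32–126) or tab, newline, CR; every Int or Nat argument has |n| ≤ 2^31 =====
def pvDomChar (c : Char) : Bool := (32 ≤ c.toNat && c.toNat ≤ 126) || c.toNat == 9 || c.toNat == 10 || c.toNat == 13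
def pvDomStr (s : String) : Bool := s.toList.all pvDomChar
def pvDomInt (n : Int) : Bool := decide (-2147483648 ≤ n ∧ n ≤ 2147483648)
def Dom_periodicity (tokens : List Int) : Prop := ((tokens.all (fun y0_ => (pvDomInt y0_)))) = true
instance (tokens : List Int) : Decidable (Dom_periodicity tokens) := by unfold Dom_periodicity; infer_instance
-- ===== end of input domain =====

-- B replaces A's occurrence-list + blockwise repetition while-loop with a direct
-- scan over candidate periods, testing each divisor period by one shift comparison
-- (objective: simpler).

-- ===== PORT A =====
-- helper: enumerate with Nat indices (all indices in A are provably nonnegative);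
-- slices tokens[a:b] for 0 ≤ a ≤ b are (tokens.drop a).take (b - a), exact for
-- in-range nonnegative bounds as used by A.
def pvEnum : List Int → Nat → List (Nat × Int)
  | [], _ => []
  | x :: xs, k => (k, x) :: pvEnum xs (k + 1)

-- the inner `while end_index <= len(tokens)` loop; fuel bounds the iteration count
-- (each step increases end_index by gap ≥ 1), it never cuts the computation short.
def pA_while (tokens seq : List Int) (i startIdx endIdx fuel : Nat) : Option (Int × Int) :=
  match fuel with
  | 0 => none
  | fuel + 1 =>
    if endIdx ≤ tokens.length then
      -- gap := endIdx - startIdx, inlined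
      if endIdx ≥ tokens.length ∧
          tokens.drop startIdx = seq.take (tokens.drop startIdx).length then
        some ((i : Int), ((endIdx - startIdx : Nat) : Int))
      else if (tokens.drop startIdx).take (endIdx - startIdx) ≠ seq then
        none
      else
        pA_while tokens seq i (startIdx + (endIdx - startIdx)) (endIdx + (endIdx - startIdx)) fuel
    else none

-- [j for j, x in enumerate(tokens) if x == token and j > i]
def pA_occs (tokens : List Int) (i : Nat) (token : Int) : List Nat :=
  ((pvEnum tokens 0).filter (fun jx => jx.2 == token && decide (i < jx.1))).map Prod.fst

-- `for next_occurrence in next_occurrences: ...`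
def pA_occLoop (tokens : List Int) (i : Nat) : List Nat → Option (Int × Int)
  | [] => none
  | j :: rest =>
    match pA_while tokens ((tokens.drop i).take (j - i)) i i j (tokens.length + 2) with
    | some r => some r
    | none => pA_occLoop tokens i rest

-- `for i, token in enumerate(tokens): if token in tokens[i+1:]: ...`
def pA_loop (tokens : List Int) : List (Nat × Int) → Option (Int × Int)
  | [] => none
  | (i, token) :: rest =>
    if (tokens.drop (i + 1)).contains token then
      match pA_occLoop tokens i (pA_occs tokens i token) with
      | some r => some r
      | none => pA_loop tokens rest
    else pA_loop tokens rest

def periodicity (tokens : List Int) : Int × Int :=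
  (pA_loop tokens (pvEnum tokens 0)).getD (0, 0)

-- ===== PORT B =====
-- `for p in range(1, m): if m % p == 0 and tokens[i:n-p] == tokens[i+p:]: return i, p`
def pB_inner (tokens : List Int) (n i : Nat) : List Nat → Option Nat
  | [] => none
  | p :: rest =>
    if (n - i) % p = 0 ∧ (tokens.drop i).take (n - p - i) = tokens.drop (i + p) then
      some p
    else pB_inner tokens n i rest

def pB_outer (tokens : List Int) (n : Nat) : List Nat → Option (Int × Int)
  | [] => none
  | i :: rest =>
    match pB_inner tokens n i (List.range' 1 (n - i - 1)) with
    | some p => some ((i : Int), (p : Int))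
    | none => pB_outer tokens n rest

def periodicity_alt (tokens : List Int) : Int × Int :=
  (pB_outer tokens tokens.length (List.range tokens.length)).getD (0, 0)

-- ===== PRECONDITION & SPEC =====
def Spec_periodicity (tokens : List Int) (out : Int × Int) : Prop := out = periodicity_alt tokens
instance (tokens : List Int) (out : Int × Int) : Decidable (Spec_periodicity tokens out) := by unfold Spec_periodicity; infer_instance

-- ===== CLAIM (what is proved, stated in full; the proofs are below) =====
def Claim_equal_periodicity : Prop := ∀ (tokens : List Int), Dom_periodicity tokens → Spec_periodicity tokens (periodicity tokens)

-- ===== LEMMAS AND PROOFS =====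

-- small generic list lemmas used by the proofs
theorem myFindFilter (f q : Nat → Bool) : ∀ l : List Nat,
    (l.filter q).find? f = l.find? (fun a => q a && f a) := by
  intro l
  induction l with
  | nil => rfl
  | cons a rest ih =>
    by_cases hq : q a <;> by_cases hf : f a <;>
      simp [hq, hf, ih]

theorem myFindMap (g : Nat → Nat) (f : Nat → Bool) : ∀ l : List Nat,
    (l.map g).find? f = (l.find? (fun a => f (g a))).map g := by
  intro l
  induction l with
  | nil => rfl
  | cons a rest ih =>
    by_cases hf : f (g a) <;> simp [hf, ih]

theorem myFindCongr (f g : Nat → Bool) : ∀ l : List Nat,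
    (∀ a ∈ l, f a = g a) → l.find? f = l.find? g := by
  intro l
  induction l with
  | nil => intro _; rfl
  | cons a rest ih =>
    intro h
    have ha := h a (List.mem_cons_self ..)
    by_cases hf : g a <;>
      simp [ha, hf, ih (fun b hb => h b (List.mem_cons_of_mem _ hb))]

theorem myMemRange' (k : Nat) : ∀ s j : Nat, j ∈ List.range' s k → s ≤ j ∧ j < s + k := by
  induction k with
  | zero => intro s j h; rw [List.range'_zero] at h; cases h
  | succ k ih =>
    intro s j h
    rw [List.range'_succ] at h
    rcases List.mem_cons.mp h with rfl | h'
    · omega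
    · have := ih (s + 1) j h'
      omega

theorem myRangeShift (d : Nat) : ∀ (k s : Nat),
    List.range' (d + s) k = (List.range' s k).map (fun x => d + x) := by
  intro k
  induction k with
  | zero => intro s; rfl
  | succ k ih =>
    intro s
    simp only [List.range'_succ, List.map_cons, ← ih (s + 1)]
    refine List.cons_eq_cons.mpr ⟨rfl, ?_⟩
    rw [show d + s + 1 = d + (s + 1) from by omega]

theorem myTakeApp (a b : List Int) : ∀ k, a.length ≤ k →
    (a ++ b).take k = a ++ b.take (k - a.length) := by
  induction a with
  | nil => intro k _; simp
  | cons x xs ih =>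
    intro k hk
    match k, hk with
    | k + 1, hk =>
      simp only [List.cons_append, List.take_succ_cons, List.length_cons]
      rw [ih k (by simp only [List.length_cons] at hk; omega),
        show k + 1 - (xs.length + 1) = k - xs.length from by omega]

theorem pvEnum_eq (t : List Int) : ∀ k, pvEnum t k =
    (List.range t.length).map (fun j => (k + j, t.getD j 0)) := by
  induction t with
  | nil => intro k; simp [pvEnum]
  | cons x xs ih =>
    intro k
    simp only [pvEnum, List.length_cons, List.range_succ_eq_map, List.map_cons,
      List.map_map, ih]
    refine List.cons_eq_cons.mpr ⟨by simp, ?_⟩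
    apply List.map_congr_left
    intro j _
    simp only [Function.comp_apply, Nat.succ_eq_add_one, List.getD_cons_succ]
    exact Prod.ext_iff.mpr ⟨by omega, rfl⟩

-- shift-equality: B's comparison tokens[i:n-p] == tokens[i+p:]
abbrev pvSE (t : List Int) (s p : Nat) : Prop :=
  (t.drop s).take (t.length - p - s) = t.drop (s + p)

-- block of width p starting at s
def pvBlk (t : List Int) (s p : Nat) : List Int := (t.drop s).take p

theorem pvBlk_len (t : List Int) (s p : Nat) (h : s + p ≤ t.length) :
    (pvBlk t s p).length = p := by
  simp only [pvBlk, List.length_take, List.length_drop]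
  omega

theorem myDropSplit (t : List Int) (s p : Nat) :
    t.drop s = pvBlk t s p ++ t.drop (s + p) := by
  unfold pvBlk
  conv_lhs => rw [← List.take_append_drop p (t.drop s)]
  rw [List.drop_drop]

-- shift-equality at the last block is trivial
theorem pvSE_last (t : List Int) (s p : Nat) (h : s + p = t.length) : pvSE t s p := by
  unfold pvSE
  rw [show t.length - p - s = 0 from by omega, List.take_zero, h, List.drop_length]

-- the step decomposition of shift-equality
theorem pvSE_step (t : List Int) (s p : Nat) (hp : 1 ≤ p) (h2 : s + p + p ≤ t.length) :
    pvSE t s p ↔ (pvBlk t s p = pvBlk t (s + p) p ∧ pvSE t (s + p) p) := by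
  have hb1 := pvBlk_len t s p (by omega)
  have hb2 := pvBlk_len t (s + p) p (by omega)
  unfold pvSE
  rw [myDropSplit t s p,
    myTakeApp (pvBlk t s p) (t.drop (s + p)) (t.length - p - s) (by rw [hb1]; omega),
    hb1, show t.length - p - s - p = t.length - p - (s + p) from by omega]
  constructor
  · intro h
    obtain ⟨e1, e2⟩ := List.append_inj (h.trans (myDropSplit t (s + p) p)) (hb1.trans hb2.symm)
    exact ⟨e1, e2⟩
  · rintro ⟨e1, e2⟩
    rw [e1, e2, ← myDropSplit t (s + p) p]

-- shift-equality forces the first element to recur p later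
theorem pvSE_head (t : List Int) (s p : Nat) (_hp : 1 ≤ p) (h : s + p < t.length) :
    pvSE t s p → t[s + p]? = t[s]? := by
  intro hse
  have h0 := congrArg (fun l => l[0]?) hse
  simp only [List.getElem?_take, List.getElem?_drop, Nat.add_zero] at h0
  rw [if_pos (by omega : (0 : Nat) < t.length - p - s)] at h0
  exact h0.symm

-- characterization of A's while loop
theorem pA_while_iff (t seq : List Int) (i p : Nat) (hp : 1 ≤ p) (hseq : seq.length = p) :
    ∀ fuel s, t.length + 1 - s ≤ fuel → s + p ≤ t.length →
      (pA_while t seq i s (s + p) fuel =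
        if pvBlk t s p = seq ∧ p ∣ (t.length - s) ∧ pvSE t s p
        then some ((i : Int), (p : Int)) else none) := by
  intro fuel
  induction fuel with
  | zero => intro s hf hs; exact absurd hs (by omega)
  | succ fuel ih =>
    intro s hf hs
    rw [pA_while, if_pos hs]
    have hgap : s + p - s = p := by omega
    rw [hgap]
    by_cases hend : s + p = t.length
    · have hlen : (t.drop s).length = p := by simp only [List.length_drop]; omega
      have htk : seq.take (t.drop s).length = seq := by rw [hlen, ← hseq, List.take_length]
      have hblk : (t.drop s).take p = t.drop s := by rw [← hlen, List.take_length]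
      by_cases hq : t.drop s = seq
      · rw [if_pos ⟨by omega, by rw [htk]; exact hq⟩]
        rw [if_pos (⟨show pvBlk t s p = seq from by unfold pvBlk; rw [hblk]; exact hq,
          ⟨1, by omega⟩, pvSE_last t s p hend⟩ :
            pvBlk t s p = seq ∧ p ∣ (t.length - s) ∧ pvSE t s p)]
      · rw [if_neg (fun hc => hq (by rw [← htk]; exact hc.2))]
        rw [if_pos (show (t.drop s).take p ≠ seq from by rw [hblk]; exact hq)]
        rw [if_neg (fun hc => hq (by rw [← hblk]; exact hc.1))]
    · have hlt : s + p < t.length := by omega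
      rw [if_neg (fun hc => absurd hc.1 (by omega))]
      by_cases hb : (t.drop s).take p = seq
      · rw [if_neg (not_not_intro hb)]
        by_cases h2 : s + p + p ≤ t.length
        · rw [ih (s + p) (by omega) h2]
          refine if_congr ?_ rfl rfl
          constructor
          · rintro ⟨e1, e2, e3⟩
            refine ⟨hb, ?_, ?_⟩
            · rw [show t.length - s = (t.length - (s + p)) + p from by omega]
              exact Nat.dvd_add e2 dvd_rfl
            · exact (pvSE_step t s p hp h2).mpr
                ⟨(show pvBlk t s p = seq from hb).trans e1.symm, e3⟩
          · rintro ⟨_, hd, hse⟩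
            obtain ⟨eb, e3⟩ := (pvSE_step t s p hp h2).mp hse
            refine ⟨eb.symm.trans hb, ?_, e3⟩
            rw [show t.length - (s + p) = (t.length - s) - p from by omega]
            exact Nat.dvd_sub hd dvd_rfl
        · have h2p : ¬ p ∣ (t.length - s) := by
            rintro ⟨c, hc⟩
            match c, hc with
            | 0, hc => omega
            | 1, hc => omega
            | c + 2, hc =>
              have hge : p * 2 ≤ p * (c + 2) := Nat.mul_le_mul (Nat.le_refl p) (by omega)
              omega
          rw [if_neg (fun hc => h2p hc.2.1)]
          rcases fuel with _ | fuel'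
          · exact absurd hf (by omega)
          · rw [pA_while, if_neg (by omega)]
      · rw [if_pos hb, if_neg (fun hc => hb hc.1)]

-- find?-style characterizations of the small loops
theorem pB_inner_eq_find (t : List Int) (i : Nat) : ∀ l, pB_inner t t.length i l =
    l.find? (fun p => decide ((t.length - i) % p = 0 ∧ pvSE t i p)) := by
  intro l
  induction l with
  | nil => rfl
  | cons p rest ih =>
    rw [pB_inner, List.find?_cons]
    by_cases h : (t.length - i) % p = 0 ∧ (t.drop i).take (t.length - p - i) = t.drop (i + p)
    · rw [if_pos h, show (decide ((t.length - i) % p = 0 ∧ pvSE t i p)) = true from by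
        simp only [pvSE]; exact decide_eq_true h]
    · rw [if_neg h, show (decide ((t.length - i) % p = 0 ∧ pvSE t i p)) = false from by
        simp only [pvSE]; exact decide_eq_false h, ih]

theorem pA_occLoop_eq_find (t : List Int) (i : Nat) : ∀ l : List Nat,
    (∀ j ∈ l, i < j ∧ j < t.length) →
    pA_occLoop t i l =
      (l.find? (fun j => decide ((j - i) ∣ (t.length - i) ∧ pvSE t i (j - i)))).map
        (fun j => ((i : Int), ((j - i : Nat) : Int))) := by
  intro l
  induction l with
  | nil => intro _; rfl
  | cons j rest ih =>
    intro hl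
    obtain ⟨hij, hjn⟩ := hl j (List.mem_cons_self ..)
    have hseq : ((t.drop i).take (j - i)).length = j - i := by
      simp only [List.length_take, List.length_drop]; omega
    have hw := pA_while_iff t ((t.drop i).take (j - i)) i (j - i) (by omega) hseq
      (t.length + 2) i (by omega) (by omega)
    simp only [show i + (j - i) = j from by omega] at hw
    rw [pA_occLoop, hw, List.find?_cons]
    have hblk : pvBlk t i (j - i) = (t.drop i).take (j - i) := rfl
    by_cases hc : (j - i) ∣ (t.length - i) ∧ pvSE t i (j - i)
    · rw [if_pos ⟨hblk, hc.1, hc.2⟩,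
        show (decide ((j - i) ∣ (t.length - i) ∧ pvSE t i (j - i))) = true from decide_eq_true hc]
      rfl
    · rw [if_neg (fun hx => hc ⟨hx.2.1, hx.2.2⟩),
        show (decide ((j - i) ∣ (t.length - i) ∧ pvSE t i (j - i))) = false from decide_eq_false hc]
      exact ih (fun b hb => hl b (List.mem_cons_of_mem _ hb))

-- enumerate-filter-project characterization, in the exact syntactic form of the port
theorem myEnumFilterFst (t : List Int) (tok : Int) (iN : Nat) : ∀ l : List Nat,
    ((l.map (fun j => (j, t.getD j 0))).filter
        (fun jx => jx.2 == tok && decide (iN < jx.1))).map Prod.fst =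
      l.filter (fun j => t.getD j 0 == tok && decide (iN < j)) := by
  intro l
  induction l with
  | nil => rfl
  | cons a rest ih =>
    simp only [List.map_cons, List.filter_cons]
    by_cases hq : (t.getD a 0 == tok && decide (iN < a)) = true
    · rw [if_pos hq, if_pos hq, List.map_cons, ih]
    · rw [if_neg hq, if_neg hq, ih]

-- pushing the filtered range through the shift map
theorem myShiftChar (t : List Int) (tok : Int) (iN : Nat) : ∀ (k s : Nat), 1 ≤ s →
    ((List.range' s k).map (fun x => iN + x)).filter
        (fun j => t.getD j 0 == tok && decide (iN < j)) =
      ((List.range' s k).filter (fun p => t.getD (iN + p) 0 == tok)).map (fun x => iN + x) := by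
  intro k
  induction k with
  | zero => intro s _; rfl
  | succ k ih =>
    intro s hs
    simp only [List.range'_succ, List.map_cons, List.filter_cons]
    have hdec : (decide (iN < iN + s)) = true := decide_eq_true (by omega)
    by_cases hq : (t.getD (iN + s) 0 == tok) = true
    · rw [show (t.getD (iN + s) 0 == tok && decide (iN < iN + s)) = true from by
        rw [hq, hdec]; rfl, hq, if_pos rfl, if_pos rfl, List.map_cons, ih (s + 1) (by omega)]
    · rw [show (t.getD (iN + s) 0 == tok && decide (iN < iN + s)) = false from by
        rw [hdec, Bool.and_true, Bool.eq_false_iff]; exact hq,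
        show (t.getD (iN + s) 0 == tok) = false from by
          rw [Bool.eq_false_iff]; exact hq,
        if_neg Bool.false_ne_true, if_neg Bool.false_ne_true, ih (s + 1) (by omega)]

-- the occurrence list, rewritten over the candidate-period range
theorem pA_occs_eq (t : List Int) (i : Nat) (hi : i < t.length) :
    pA_occs t i (t.getD i 0) =
      ((List.range' 1 (t.length - i - 1)).filter
        (fun p => t.getD (i + p) 0 == t.getD i 0)).map (fun x => i + x) := by
  unfold pA_occs
  rw [pvEnum_eq t 0,
    show (fun j => ((0 : Nat) + j, t.getD j 0)) = (fun j : Nat => (j, t.getD j 0)) from by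
      funext j; rw [Nat.zero_add],
    myEnumFilterFst t (t.getD i 0) i (List.range t.length)]
  have hsplit : List.range t.length =
      List.range' 0 (i + 1) ++ List.range' (i + 1) (t.length - i - 1) := by
    rw [List.range_eq_range']
    have h := @List.range'_append 0 (i + 1) (t.length - i - 1) 1
    rw [show 0 + 1 * (i + 1) = i + 1 from by omega,
      show i + 1 + (t.length - i - 1) = t.length from by omega] at h
    exact h.symm
  rw [hsplit, List.filter_append,
    show (List.range' 0 (i + 1)).filter
        (fun j => t.getD j 0 == t.getD i 0 && decide (i < j)) = [] from by
      apply List.filter_eq_nil_iff.mpr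
      intro j hj
      have hjr := myMemRange' (i + 1) 0 j hj
      simp only [Bool.and_eq_true, decide_eq_true_eq, not_and]
      intro _
      omega,
    List.nil_append,
    show List.range' (i + 1) (t.length - i - 1) =
      (List.range' 1 (t.length - i - 1)).map (fun x => i + x) from myRangeShift i _ 1,
    myShiftChar t (t.getD i 0) i (t.length - i - 1) 1 (Nat.le_refl 1)]

-- per-index equivalence of the two loop bodies
theorem perI (t : List Int) (i : Nat) (hi : i < t.length) :
    (if (t.drop (i + 1)).contains (t.getD i 0) then
      pA_occLoop t i (pA_occs t i (t.getD i 0))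
    else none) =
      (pB_inner t t.length i (List.range' 1 (t.length - i - 1))).map
        (fun p : Nat => ((i : Int), (p : Int))) := by
  rw [pB_inner_eq_find]
  by_cases hc : (t.drop (i + 1)).contains (t.getD i 0)
  · rw [if_pos hc, pA_occs_eq t i hi]
    have hl : ∀ j ∈ ((List.range' 1 (t.length - i - 1)).filter
        (fun p => t.getD (i + p) 0 == t.getD i 0)).map (fun x => i + x),
        i < j ∧ j < t.length := by
      intro j hj
      obtain ⟨p, hpmem, rfl⟩ := List.mem_map.mp hj
      have h1 := myMemRange' (t.length - i - 1) 1 p (List.mem_filter.mp hpmem).1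
      omega
    rw [pA_occLoop_eq_find t i _ hl, myFindMap, myFindFilter, Option.map_map]
    rw [show ((fun j => ((i : Int), ((j - i : Nat) : Int))) ∘ (fun x => i + x)) =
        (fun p : Nat => ((i : Int), (p : Int))) from by
      funext p
      simp only [Function.comp_apply]
      rw [show i + p - i = p from by omega]]
    refine congrArg (Option.map _) (myFindCongr _ _ _ ?_)
    intro p hp
    have h1 := myMemRange' (t.length - i - 1) 1 p hp
    show ((t.getD (i + p) 0 == t.getD i 0) &&
        decide ((i + p - i) ∣ (t.length - i) ∧ pvSE t i (i + p - i))) =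
      decide ((t.length - i) % p = 0 ∧ pvSE t i p)
    simp only [show i + p - i = p from by omega]
    by_cases hse : pvSE t i p
    · have hh := pvSE_head t i p (by omega) (by omega) hse
      have hbeq : (t.getD (i + p) 0 == t.getD i 0) = true := by
        rw [List.getD_eq_getElem?_getD, List.getD_eq_getElem?_getD, hh]
        exact beq_self_eq_true _
      rw [hbeq, Bool.true_and]
      apply decide_eq_decide.mpr
      exact ⟨fun ⟨a, b⟩ => ⟨Nat.mod_eq_zero_of_dvd a, b⟩,
        fun ⟨a, b⟩ => ⟨Nat.dvd_of_mod_eq_zero a, b⟩⟩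
    · rw [decide_eq_false (fun h => hse h.2), decide_eq_false (fun h => hse h.2),
        Bool.and_false]
  · rw [if_neg hc,
      show (List.range' 1 (t.length - i - 1)).find?
        (fun p => decide ((t.length - i) % p = 0 ∧ pvSE t i p)) = none from by
      apply List.find?_eq_none.mpr
      intro p hp hpred
      obtain ⟨hmod, hse⟩ := of_decide_eq_true hpred
      have h1 := myMemRange' (t.length - i - 1) 1 p hp
      have hh := pvSE_head t i p (by omega) (by omega) hse
      have hsome : t[i]? = some (t.getD i 0) := by
        rw [List.getD_eq_getElem?_getD, List.getElem?_eq_getElem hi]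
        rfl
      have hmem : t.getD i 0 ∈ t.drop (i + 1) := by
        apply List.mem_of_getElem? (i := p - 1)
        rw [List.getElem?_drop, show i + 1 + (p - 1) = i + p from by omega, hh, hsome]
      exact absurd (List.contains_iff_mem.mpr hmem) hc]
    rfl

-- the outer loops agree
theorem outer_eq (t : List Int) : ∀ l : List Nat, (∀ i' ∈ l, i' < t.length) →
    pA_loop t (l.map (fun i => (i, t.getD i 0))) = pB_outer t t.length l := by
  intro l
  induction l with
  | nil => intro _; rfl
  | cons i rest ih =>
    intro hl
    have hi : i < t.length := hl i (List.mem_cons_self ..)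
    have hrest := ih (fun b hb => hl b (List.mem_cons_of_mem _ hb))
    rw [List.map_cons, pA_loop, pB_outer]
    have hper := perI t i hi
    by_cases hc : (t.drop (i + 1)).contains (t.getD i 0)
    · rw [if_pos hc] at hper
      rw [if_pos hc, hper]
      cases hpb : pB_inner t t.length i (List.range' 1 (t.length - i - 1)) with
      | none => exact hrest
      | some p => rfl
    · rw [if_neg hc] at hper
      rw [if_neg hc]
      cases hpb : pB_inner t t.length i (List.range' 1 (t.length - i - 1)) with
      | none => exact hrest
      | some p =>
        rw [hpb] at hper
        simp at hper

-- ===== VERDICT (by name: the statement is the Claim_ definition above) =====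
theorem periodicity_spec : Claim_equal_periodicity := by
  intro tokens _
  unfold Spec_periodicity periodicity periodicity_alt
  rw [pvEnum_eq tokens 0]
  rw [show (fun j => ((0 : Nat) + j, tokens.getD j 0)) = (fun j => (j, tokens.getD j 0)) from by
    funext j; rw [Nat.zero_add]]
  rw [outer_eq tokens (List.range tokens.length) (by intro i' hi'; simpa using hi')]
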